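-- pv_equiv track=rewrite | github.com/raj4tshenoy/foodkg | mixed_model/foodon_graph.py | map_uris_to_indices
-- ===== SOURCE A (Python) =====
-- def map_uris_to_indices(triples):
--     entity2id = {}
--     relation2id = {}
--     entity_idx = 0
--     relation_idx = 0
--
--     indexed_triples = []
--
--     for s, p, o in triples:
--         if s not in entity2id:
--             entity2id[s] = entity_idx
--             entity_idx += 1
--         if o not in entity2id:
--             entity2id[o] = entity_idx
--             entity_idx += 1
--         if p not in relation2id:
--             relation2id[p] = relation_idx
--             relation_idx += 1
--
--         indexed_triples.append((entity2id[s], relation2id[p], entity2id[o]))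
--
--     return indexed_triples, entity2id, relation2id
-- ===== SOURCE B (Python) =====
-- def map_uris_to_indices(triples):
--     # 1. collect the uri streams (entities in s-then-o order, relations in p order)
--     entities = list(dict.fromkeys(u for s, _, o in triples for u in (s, o)))
--     relations = list(dict.fromkeys(p for _, p, _ in triples))
--     # 2. ids are just positions in the deduplicated streams
--     entity2id = {u: i for i, u in enumerate(entities)}
--     relation2id = {p: i for i, p in enumerate(relations)}
--     # 3. map the triples by pure lookup
--     indexed_triples = [(entity2id[s], relation2id[p], entity2id[o])
--                        for s, p, o in triples]
--     return indexed_triples, entity2id, relation2id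
-- ===== Notes on version B (the rewrite author's own statement) =====
-- stated objective: simpler
-- what changed: Replaces A's fused loop with guarded dict insertions and manual id counters by a declarative pipeline: flatten the uri streams, order-preserving dedup via dict.fromkeys, ids = positions via enumerate, then a pure-lookup comprehension.
import Mathlib
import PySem

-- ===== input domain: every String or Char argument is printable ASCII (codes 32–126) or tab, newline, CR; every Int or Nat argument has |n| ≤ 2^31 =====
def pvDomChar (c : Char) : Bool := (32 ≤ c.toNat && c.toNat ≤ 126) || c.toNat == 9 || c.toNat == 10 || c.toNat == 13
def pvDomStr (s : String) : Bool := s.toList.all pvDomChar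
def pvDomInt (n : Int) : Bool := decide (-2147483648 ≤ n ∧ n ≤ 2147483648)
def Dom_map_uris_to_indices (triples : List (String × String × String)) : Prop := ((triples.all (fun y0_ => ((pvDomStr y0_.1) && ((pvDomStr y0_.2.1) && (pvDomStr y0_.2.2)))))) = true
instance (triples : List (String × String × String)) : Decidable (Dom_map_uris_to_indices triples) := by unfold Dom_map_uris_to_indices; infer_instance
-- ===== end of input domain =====

-- B replaces A's fused loop (guarded inserts + manual counters) by a pipeline: flatten the uri streams, ordered dedup, ids = enumerate positions, then pure-lookup mapping; objective: simpler.


-- ===== PORT A =====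
-- the body of A's for-loop, step for step
def pvAStep (st : PySem.Dict String Int × PySem.Dict String Int × Int × Int × List (Int × Int × Int))
    (t : String × String × String) :
    PySem.Dict String Int × PySem.Dict String Int × Int × Int × List (Int × Int × Int) :=
  let (e2id, r2id, eIdx, rIdx, acc) := st
  let (s, p, o) := t
  let (e2id, eIdx) := if e2id.contains s then (e2id, eIdx) else (e2id.insert s eIdx, eIdx + 1)
  let (e2id, eIdx) := if e2id.contains o then (e2id, eIdx) else (e2id.insert o eIdx, eIdx + 1)
  let (r2id, rIdx) := if r2id.contains p then (r2id, rIdx) else (r2id.insert p rIdx, rIdx + 1)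
  (e2id, r2id, eIdx, rIdx, acc ++ [(e2id.getD s 0, r2id.getD p 0, e2id.getD o 0)])

def map_uris_to_indices (triples : List (String × String × String)) :
    (List (Int × Int × Int)) × (List (String × Int)) × (List (String × Int)) :=
  let st := triples.foldl pvAStep (PySem.Dict.empty, PySem.Dict.empty, 0, 0, [])
  (st.2.2.2.2, st.1.items, st.2.1.items)

-- ===== PORT B =====
def map_uris_to_indices_alt (triples : List (String × String × String)) :
    (List (Int × Int × Int)) × (List (String × Int)) × (List (String × Int)) :=
  -- 1. uri streams, deduplicated in order (dict.fromkeys = PySem.List.dedup)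
  let entities := PySem.List.dedup (triples.flatMap (fun t => [t.1, t.2.2]))
  let relations := PySem.List.dedup (triples.map (fun t => t.2.1))
  -- 2. dict comprehensions over enumerate: id = position in the deduplicated stream
  let e2id := (PySem.List.enumerate entities).foldl (fun d p => d.insert p.2 p.1) PySem.Dict.empty
  let r2id := (PySem.List.enumerate relations).foldl (fun d p => d.insert p.2 p.1) PySem.Dict.empty
  -- 3. pure-lookup comprehension
  (triples.map (fun t => (e2id.getD t.1 0, r2id.getD t.2.1 0, e2id.getD t.2.2 0)),
   e2id.items, r2id.items)

-- ===== PRECONDITION & SPEC =====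
def Spec_map_uris_to_indices (triples : List (String × String × String)) (out : (List (Int × Int × Int)) × (List (String × Int)) × (List (String × Int))) : Prop := out = map_uris_to_indices_alt triples
instance (triples : List (String × String × String)) (out : (List (Int × Int × Int)) × (List (String × Int)) × (List (String × Int))) : Decidable (Spec_map_uris_to_indices triples out) := by unfold Spec_map_uris_to_indices; infer_instance

-- ===== CLAIM (what is proved, stated in full; the proofs are below) =====
def Claim_equal_map_uris_to_indices : Prop := ∀ (triples : List (String × String × String)), Dom_map_uris_to_indices triples → Spec_map_uris_to_indices triples (map_uris_to_indices triples)

-- ===== LEMMAS AND PROOFS =====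

-- proof-only helpers: the 'guarded insert at the current size' step, per key and per triple
def pvSD (d : PySem.Dict String Int) (k : String) : PySem.Dict String Int :=
  d.setdefault k (d.size : Int)

def pvStep (st : PySem.Dict String Int × PySem.Dict String Int) (t : String × String × String) :
    PySem.Dict String Int × PySem.Dict String Int :=
  (pvSD (pvSD st.1 t.1) t.2.2, pvSD st.2 t.2.1)

-- setdefault preserves existing bindings
theorem pv_get?_setdefault_of_some (d : PySem.Dict String Int) (k k' : String) (w v : Int)
    (h : d.get? k' = some v) : (d.setdefault k w).get? k' = some v := by
  by_cases he : k' = k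
  · subst he; rw [PySem.Dict.get?_setdefault_self, h]; rfl
  · rw [PySem.Dict.get?_setdefault_of_ne _ _ he]; exact h

theorem pv_contains_setdefault_self (d : PySem.Dict String Int) (k : String) (w : Int) :
    (d.setdefault k w).contains k = true := by
  simp [PySem.Dict.contains_setdefault]

theorem pv_contains_setdefault_mono (d : PySem.Dict String Int) (k k' : String) (w : Int)
    (h : d.contains k' = true) : (d.setdefault k w).contains k' = true := by
  simp [PySem.Dict.contains_setdefault, h]

-- the whole pvStep-fold preserves existing bindings (entity side / relation side)
theorem pv_fold_get?_left (l : List (String × String × String))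
    (e r : PySem.Dict String Int) (k : String) (v : Int) (h : e.get? k = some v) :
    (l.foldl pvStep (e, r)).1.get? k = some v := by
  induction l generalizing e r with
  | nil => exact h
  | cons t ts ih =>
    simp only [List.foldl_cons, pvStep]
    exact ih _ _ (pv_get?_setdefault_of_some _ _ _ _ _ (pv_get?_setdefault_of_some _ _ _ _ _ h))

theorem pv_fold_get?_right (l : List (String × String × String))
    (e r : PySem.Dict String Int) (k : String) (v : Int) (h : r.get? k = some v) :
    (l.foldl pvStep (e, r)).2.get? k = some v := by
  induction l generalizing e r with
  | nil => exact h
  | cons t ts ih =>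
    simp only [List.foldl_cons, pvStep]
    exact ih _ _ (pv_get?_setdefault_of_some _ _ _ _ _ h)

theorem pv_fold_getD_left (l : List (String × String × String))
    (e r : PySem.Dict String Int) (k : String) (h : e.contains k = true) :
    (l.foldl pvStep (e, r)).1.getD k 0 = e.getD k 0 := by
  rw [PySem.Dict.contains_eq_isSome_get?] at h
  obtain ⟨v, hv⟩ := Option.isSome_iff_exists.mp h
  rw [PySem.Dict.getD_of_get?_eq_some _ 0 (pv_fold_get?_left l e r k v hv),
      PySem.Dict.getD_of_get?_eq_some _ 0 hv]

theorem pv_fold_getD_right (l : List (String × String × String))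
    (e r : PySem.Dict String Int) (k : String) (h : r.contains k = true) :
    (l.foldl pvStep (e, r)).2.getD k 0 = r.getD k 0 := by
  rw [PySem.Dict.contains_eq_isSome_get?] at h
  obtain ⟨v, hv⟩ := Option.isSome_iff_exists.mp h
  rw [PySem.Dict.getD_of_get?_eq_some _ 0 (pv_fold_get?_right l e r k v hv),
      PySem.Dict.getD_of_get?_eq_some _ 0 hv]

-- A's membership-guarded insert with the counter equal to the size IS pvSD, and keeps counter = size
theorem pv_pair_eq (e : PySem.Dict String Int) (k : String) :
    (if e.contains k then (e, (e.size : Int)) else (e.insert k (e.size : Int), (e.size : Int) + 1))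
      = (pvSD e k, ((pvSD e k).size : Int)) := by
  unfold pvSD
  by_cases hc : e.contains k = true
  · rw [if_pos hc, PySem.Dict.setdefault_of_contains _ _ hc]
  · have hc' : e.contains k = false := by simpa using hc
    rw [if_neg (by simp [hc']), PySem.Dict.setdefault_of_not_contains _ _ hc',
        PySem.Dict.size_insert]
    simp [hc']

-- one A-step, started with the counters equal to the dict sizes, is one pvStep plus the appended lookup
theorem pv_step_eq (e r : PySem.Dict String Int) (acc : List (Int × Int × Int))
    (t : String × String × String) :
    pvAStep (e, r, (e.size : Int), (r.size : Int), acc) t =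
      ((pvStep (e, r) t).1, (pvStep (e, r) t).2,
       ((pvStep (e, r) t).1.size : Int), ((pvStep (e, r) t).2.size : Int),
       acc ++ [((pvStep (e, r) t).1.getD t.1 0, (pvStep (e, r) t).2.getD t.2.1 0,
                (pvStep (e, r) t).1.getD t.2.2 0)]) := by
  obtain ⟨s, p, o⟩ := t
  simp only [pvAStep, pvStep, pv_pair_eq]

-- invariant 1: A's fold from (e, r, |e|, |r|, acc) is the pvStep-fold plus the mapped lookups
theorem pv_main (l : List (String × String × String))
    (e r : PySem.Dict String Int) (acc : List (Int × Int × Int)) :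
    l.foldl pvAStep (e, r, (e.size : Int), (r.size : Int), acc) =
      ((l.foldl pvStep (e, r)).1, (l.foldl pvStep (e, r)).2,
       ((l.foldl pvStep (e, r)).1.size : Int), ((l.foldl pvStep (e, r)).2.size : Int),
       acc ++ l.map (fun t => ((l.foldl pvStep (e, r)).1.getD t.1 0,
                               (l.foldl pvStep (e, r)).2.getD t.2.1 0,
                               (l.foldl pvStep (e, r)).1.getD t.2.2 0))) := by
  induction l generalizing e r acc with
  | nil => simp
  | cons t ts ih =>
    simp only [List.foldl_cons, List.map_cons, pv_step_eq]
    rw [ih]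
    have he1s : (pvStep (e, r) t).1.contains t.1 = true := by
      simp only [pvStep, pvSD]
      exact pv_contains_setdefault_mono _ _ _ _ (pv_contains_setdefault_self _ _ _)
    have he1o : (pvStep (e, r) t).1.contains t.2.2 = true := by
      simp only [pvStep, pvSD]
      exact pv_contains_setdefault_self _ _ _
    have hr1p : (pvStep (e, r) t).2.contains t.2.1 = true := by
      simp only [pvStep, pvSD]
      exact pv_contains_setdefault_self _ _ _
    rw [pv_fold_getD_left ts _ _ _ he1s, pv_fold_getD_left ts _ _ _ he1o,
        pv_fold_getD_right ts _ _ _ hr1p]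
    simp

-- invariant 2: the pvStep-fold splits into two single-dict pvSD-folds over the uri streams
theorem pv_split (l : List (String × String × String)) (e r : PySem.Dict String Int) :
    l.foldl pvStep (e, r) =
      ((l.flatMap (fun t => [t.1, t.2.2])).foldl pvSD e, (l.map (fun t => t.2.1)).foldl pvSD r) := by
  induction l generalizing e r with
  | nil => rfl
  | cons t ts ih => simp only [List.foldl_cons, List.flatMap_cons, List.map_cons,
      List.foldl_append, pvStep]; exact ih _ _

-- the keys of l not yet seen, in first-occurrence order
def pvFresh (seen : PySem.Set String) : List String → List String
  | [] => []
  | k :: l => if PySem.Set.contains seen k then pvFresh seen l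
              else k :: pvFresh (PySem.Set.add seen k) l

theorem pv_update_eq_append_fresh (l : List String) (s : PySem.Set String) :
    PySem.Set.update s l = s ++ pvFresh s l := by
  induction l generalizing s with
  | nil => simp [PySem.Set.update, pvFresh]
  | cons k ls ih =>
    have hstep : PySem.Set.update s (k :: ls) = PySem.Set.update (PySem.Set.add s k) ls := rfl
    rw [hstep, ih]
    by_cases hc : PySem.Set.contains s k = true
    · have hadd : PySem.Set.add s k = s := by simp only [PySem.Set.add, hc, if_pos]
      rw [hadd]
      simp only [pvFresh]
      rw [if_pos hc]
    · have hc' : PySem.Set.contains s k = false := by simpa using hc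
      have hadd : PySem.Set.add s k = s ++ [k] := by simp only [PySem.Set.add, hc']; simp
      rw [hadd]
      simp only [pvFresh]
      rw [if_neg hc, hadd]
      simp

theorem pv_dedup_eq_fresh (l : List String) :
    PySem.List.dedup l = pvFresh PySem.Set.empty l := by
  have h := pv_update_eq_append_fresh l PySem.Set.empty
  simpa [PySem.Set.update, PySem.Set.ofList_eq_foldl, PySem.Set.empty] using h

-- invariant 3: the pvSD-fold is the insert-fold over the enumerated fresh keys
theorem pv_sd_fold_eq (l : List String) (d : PySem.Dict String Int) :
    l.foldl pvSD d =
      (PySem.List.enumerate (pvFresh d.keys l) (d.size : Int)).foldl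
        (fun d p => d.insert p.2 p.1) d := by
  induction l generalizing d with
  | nil => simp [pvFresh, PySem.List.enumerate_nil]
  | cons k ls ih =>
    by_cases hc : d.contains k = true
    · have hs : PySem.Set.contains d.keys k = true := by
        simpa [PySem.Set.contains] using (PySem.Dict.contains_iff_mem_keys d k).mp hc
      simp only [List.foldl_cons, pvSD, PySem.Dict.setdefault_of_contains _ _ hc, pvFresh]
      rw [if_pos hs]
      exact ih d
    · have hc' : d.contains k = false := by simpa using hc
      have hs : PySem.Set.contains d.keys k = false := by
        simp only [PySem.Set.contains]
        simp only [List.contains_eq_mem, decide_eq_false_iff_not]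
        intro hm
        exact absurd ((PySem.Dict.contains_iff_mem_keys d k).mpr hm) (by simp [hc'])
      have hkeys : (d.insert k (d.size : Int)).keys = d.keys ++ [k] := by
        simp [PySem.Dict.keys, PySem.Dict.items_insert_of_not_contains _ _ hc']
      have hadd : PySem.Set.add d.keys k = d.keys ++ [k] := by
        simp only [PySem.Set.add, hs]; simp
      have hsize : ((d.insert k (d.size : Int)).size : Int) = (d.size : Int) + 1 := by
        rw [PySem.Dict.size_insert]; simp [hc']
      simp only [List.foldl_cons, pvSD, PySem.Dict.setdefault_of_not_contains _ _ hc', pvFresh]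
      rw [if_neg (by rw [hs]; simp), hadd, PySem.List.enumerate_cons]
      simp only [List.foldl_cons]
      rw [ih (d.insert k (d.size : Int)), hkeys, hsize]

-- ===== VERDICT (by name: the statement is the Claim_ definition above) =====
theorem map_uris_to_indices_spec : Claim_equal_map_uris_to_indices := by
  intro triples _
  unfold Spec_map_uris_to_indices map_uris_to_indices map_uris_to_indices_alt
  have h := pv_main triples PySem.Dict.empty PySem.Dict.empty []
  simp only [PySem.Dict.size_empty, Nat.cast_zero] at h
  rw [h, pv_split]
  rw [pv_sd_fold_eq, pv_sd_fold_eq, pv_dedup_eq_fresh, pv_dedup_eq_fresh]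
  simp [PySem.Dict.keys_empty, PySem.Dict.size_empty, PySem.Set.empty]
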